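-- pv_equiv track=rewrite | github.com/Lewa9000/Alabuga_tests | solution2.py | _calculate_diversity_result
-- ===== SOURCE A (Python) =====
-- from itertools import product
--
-- def _calculate_diversity_result(cards_a: list[str], cards_b: list[str]) -> str:
--     while cards_pairs := list(
--             filter(lambda cards: cards[0] == cards[1], product(cards_a, cards_b))
--             ):
--         for cards in cards_pairs:
--             if cards[0] in cards_a and cards[1] in cards_b:
--                 cards_a.remove(cards[0])
--                 cards_b.remove(cards[1])
--     else:
--         return str(len(cards_a) + len(cards_b))
-- ===== SOURCE B (Python) =====
-- def _calculate_diversity_result(cards_a: list[str], cards_b: list[str]) -> str: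
--     # Single greedy pass: count the multiset intersection, no mutation of the inputs.
--     remaining = list(cards_b)
--     common = 0
--     for card in cards_a:
--         if card in remaining:
--             remaining.remove(card)
--             common += 1
--     return str(len(cards_a) + len(cards_b) - 2 * common)
-- ===== Notes on version B (the rewrite author's own statement) =====
-- stated objective: faster
-- what changed: Replaces A's fixpoint loop that materialises the full cartesian product of the two lists, filters the equal pairs and strips them in place by a single greedy pass over cards_a against a copy of cards_b that counts the multiset intersection and returns len(a)+len(b)-2*common; B does not mutate its arguments.
import Mathlib
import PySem

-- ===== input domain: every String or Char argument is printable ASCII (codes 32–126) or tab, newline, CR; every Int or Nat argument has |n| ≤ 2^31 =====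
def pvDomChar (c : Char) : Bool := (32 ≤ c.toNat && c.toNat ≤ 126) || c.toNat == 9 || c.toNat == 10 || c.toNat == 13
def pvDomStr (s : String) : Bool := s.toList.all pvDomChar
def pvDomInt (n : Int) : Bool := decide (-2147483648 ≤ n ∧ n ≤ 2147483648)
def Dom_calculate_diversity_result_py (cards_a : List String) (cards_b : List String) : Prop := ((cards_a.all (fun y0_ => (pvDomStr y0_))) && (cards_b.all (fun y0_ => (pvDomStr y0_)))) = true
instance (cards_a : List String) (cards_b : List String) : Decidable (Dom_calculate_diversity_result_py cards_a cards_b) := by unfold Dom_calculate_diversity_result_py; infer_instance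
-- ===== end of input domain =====

-- B replaces A's repeated full-product-and-remove fixpoint by one greedy counting pass (simpler);
-- Python A strips the intersection from its argument lists in place, B leaves them unchanged —
-- the equivalence proved here is about the RETURN value only.

-- ===== PORT A =====
-- list(filter(lambda cards: cards[0] == cards[1], product(cards_a, cards_b)))
def pvPairsA (ca : List String) (cb : List String) : List (String × String) :=
  (ca.flatMap (fun x => cb.map (fun y => (x, y)))).filter (fun p => p.1 == p.2)

-- body of the for-loop: if cards[0] in cards_a and cards[1] in cards_b: remove both
def pvStepA (st : List String × List String) (p : String × String) : List String × List String :=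
  if p.1 ∈ st.1 ∧ p.2 ∈ st.2 then (st.1.erase p.1, st.2.erase p.2) else st

-- the while loop, with fuel len(a)+len(b)+1 (proved sufficient below; fuel 0 is never reached)
def pvLoopA : Nat → List String → List String → String
  | 0, _, _ => ""
  | fuel + 1, ca, cb =>
    let ps := pvPairsA ca cb
    if ps.isEmpty then PySem.Int.toStr ((ca.length : Int) + (cb.length : Int))
    else
      let st := ps.foldl pvStepA (ca, cb)
      pvLoopA fuel st.1 st.2

def calculate_diversity_result_py (cards_a : List String) (cards_b : List String) : String :=
  pvLoopA (cards_a.length + cards_b.length + 1) cards_a cards_b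

-- ===== PORT B =====
-- the for-loop of Source B: walk cards_a, erase matches from the remaining copy of cards_b, count them
def pvGreedyB : List String → List String → Nat → Nat
  | [], _, common => common
  | x :: xs, rem, common =>
    if x ∈ rem then pvGreedyB xs (rem.erase x) (common + 1) else pvGreedyB xs rem common

def calculate_diversity_result_py_alt (cards_a : List String) (cards_b : List String) : String :=
  PySem.Int.toStr ((cards_a.length : Int) + (cards_b.length : Int)
      - 2 * (pvGreedyB cards_a cards_b 0 : Int))

-- ===== PRECONDITION & SPEC =====
def Spec_calculate_diversity_result_py (cards_a : List String) (cards_b : List String) (out : String) : Prop := out = calculate_diversity_result_py_alt cards_a cards_b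
instance (cards_a : List String) (cards_b : List String) (out : String) : Decidable (Spec_calculate_diversity_result_py cards_a cards_b out) := by unfold Spec_calculate_diversity_result_py; infer_instance

-- ===== CLAIM (what is proved, stated in full; the proofs are below) =====
def Claim_equal_calculate_diversity_result_py : Prop := ∀ (cards_a : List String) (cards_b : List String), Dom_calculate_diversity_result_py cards_a cards_b → Spec_calculate_diversity_result_py cards_a cards_b (calculate_diversity_result_py cards_a cards_b)

-- ===== LEMMAS AND PROOFS =====

-- B's greedy counter computes the cardinality of the multiset intersection.
theorem pvGreedyB_eq_card_inter : ∀ (a rem : List String) (c : Nat),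
    pvGreedyB a rem c = c + Multiset.card ((↑a : Multiset String) ∩ (↑rem : Multiset String)) := by
  intro a
  induction a with
  | nil => intro rem c; simp [pvGreedyB]
  | cons x xs ih =>
    intro rem c
    by_cases h : x ∈ rem
    · rw [pvGreedyB, if_pos h, ih]
      have : ((↑(x :: xs) : Multiset String) ∩ ↑rem) = x ::ₘ ((↑xs : Multiset String) ∩ ↑(rem.erase x)) := by
        rw [show ((x :: xs : List String) : Multiset String) = x ::ₘ (↑xs : Multiset String) from rfl,
          Multiset.cons_inter_of_pos _ (by exact_mod_cast h), Multiset.coe_erase]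
      rw [this]
      simp [Nat.add_comm, Nat.add_left_comm]
    · rw [pvGreedyB, if_neg h, ih]
      have : ((↑(x :: xs) : Multiset String) ∩ ↑rem) = ((↑xs : Multiset String) ∩ ↑rem) := by
        rw [show ((x :: xs : List String) : Multiset String) = x ::ₘ (↑xs : Multiset String) from rfl,
          Multiset.cons_inter_of_neg _ (by exact_mod_cast h)]
      rw [this]

-- one generator element x contributes the segment replicate (count of x in b) (x, x)
theorem pvSeg_eq_replicate (x : String) : ∀ (b : List String),
    (b.map (fun y => (x, y))).filter (fun p => p.1 == p.2) = List.replicate (b.count x) (x, x) := by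
  intro b
  induction b with
  | nil => simp
  | cons y b ih =>
    by_cases h : y = x
    · subst h
      simp only [List.map_cons, List.filter_cons, List.count_cons]
      simp [ih, List.replicate_succ]
    · simp only [List.map_cons, List.filter_cons, List.count_cons]
      have hne : (x == y) = false := by simp [Ne.symm h]
      simp [hne, ih, h]

theorem pvPairsA_cons (x : String) (a b : List String) :
    pvPairsA (x :: a) b = List.replicate (b.count x) (x, x) ++ pvPairsA a b := by
  simp only [pvPairsA, List.flatMap_cons, List.filter_append, pvSeg_eq_replicate]

-- folding one segment of n equal pairs removes min n (min countA countB) copies of x from both sides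
theorem pvFold_replicate (x : String) : ∀ (n : Nat) (ca cb : List String),
    (((List.replicate n (x, x)).foldl pvStepA (ca, cb)).1 : Multiset String)
        = (↑ca : Multiset String) - Multiset.replicate (min n (min (ca.count x) (cb.count x))) x
    ∧ (((List.replicate n (x, x)).foldl pvStepA (ca, cb)).2 : Multiset String)
        = (↑cb : Multiset String) - Multiset.replicate (min n (min (ca.count x) (cb.count x))) x := by
  intro n
  induction n with
  | zero => intro ca cb; simp
  | succ n ih =>
    intro ca cb
    rw [List.replicate_succ, List.foldl_cons]
    by_cases h : x ∈ ca ∧ x ∈ cb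
    · have hstep : pvStepA (ca, cb) (x, x) = (ca.erase x, cb.erase x) := by
        simp [pvStepA, h.1, h.2]
      rw [hstep]
      obtain ⟨h1, h2⟩ := ih (ca.erase x) (cb.erase x)
      rw [h1, h2, List.count_erase_self, List.count_erase_self]
      have hca : 0 < ca.count x := List.count_pos_iff.mpr h.1
      have hcb : 0 < cb.count x := List.count_pos_iff.mpr h.2
      have hmin : min n (min (ca.count x - 1) (cb.count x - 1)) + 1
          = min (n + 1) (min (ca.count x) (cb.count x)) := by omega
      constructor
      · rw [← Multiset.coe_erase, ← Multiset.sub_singleton, tsub_tsub,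
          ← hmin, Multiset.singleton_add, ← Multiset.replicate_succ]
      · rw [← Multiset.coe_erase, ← Multiset.sub_singleton, tsub_tsub,
          ← hmin, Multiset.singleton_add, ← Multiset.replicate_succ]
    · have hstep : pvStepA (ca, cb) (x, x) = (ca, cb) := by
        simp only [pvStepA, if_neg h]
      rw [hstep]
      obtain ⟨h1, h2⟩ := ih ca cb
      have hc0 : min (ca.count x) (cb.count x) = 0 := by
        rcases not_and_or.mp h with h' | h'
        · have := List.count_eq_zero.mpr h'; omega
        · have := List.count_eq_zero.mpr h'; omega
      rw [h1, h2, hc0]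
      simp

-- main pass lemma: folding the matched pairs of (a, b0) from state (ca, cb) strips the intersection
theorem pvPass_inter (b0 : List String) : ∀ (a ca cb : List String),
    (∀ x, x ∈ ca → x ∈ cb → x ∈ a) → (∀ x, x ∈ a → cb.count x ≤ b0.count x) →
    (((pvPairsA a b0).foldl pvStepA (ca, cb)).1 : Multiset String)
        = (↑ca : Multiset String) - (↑ca : Multiset String) ∩ (↑cb : Multiset String)
    ∧ (((pvPairsA a b0).foldl pvStepA (ca, cb)).2 : Multiset String)
        = (↑cb : Multiset String) - (↑ca : Multiset String) ∩ (↑cb : Multiset String) := by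
  intro a
  induction a with
  | nil =>
    intro ca cb h1 _
    have hint : (↑ca : Multiset String) ∩ (↑cb : Multiset String) = 0 := by
      ext y
      rw [Multiset.count_inter]
      by_cases hy : y ∈ ca
      · have : y ∉ cb := fun hc => by simpa using h1 y hy hc
        simp [Multiset.coe_count, List.count_eq_zero.mpr this]
      · simp [Multiset.coe_count, List.count_eq_zero.mpr hy]
    simp [pvPairsA, hint]
  | cons x a ih =>
    intro ca cb h1 h2
    rw [pvPairsA_cons, List.foldl_append]
    obtain ⟨hs1, hs2⟩ := pvFold_replicate x (b0.count x) ca cb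
    set st := (List.replicate (b0.count x) (x, x)).foldl pvStepA (ca, cb) with hst
    have hm : min (b0.count x) (min (ca.count x) (cb.count x)) = min (ca.count x) (cb.count x) := by
      have := h2 x (by simp)
      omega
    rw [hm] at hs1 hs2
    have hcnt1 : ∀ y, st.1.count y =
        ca.count y - (if x = y then min (ca.count x) (cb.count x) else 0) := by
      intro y
      have := congrArg (Multiset.count y) hs1
      simpa [Multiset.coe_count, Multiset.count_sub, Multiset.count_replicate] using this
    have hcnt2 : ∀ y, st.2.count y =
        cb.count y - (if x = y then min (ca.count x) (cb.count x) else 0) := by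
      intro y
      have := congrArg (Multiset.count y) hs2
      simpa [Multiset.coe_count, Multiset.count_sub, Multiset.count_replicate] using this
    have hH1 : ∀ y, y ∈ st.1 → y ∈ st.2 → y ∈ a := by
      intro y hy1 hy2
      have hp1 : 0 < st.1.count y := List.count_pos_iff.mpr hy1
      have hp2 : 0 < st.2.count y := List.count_pos_iff.mpr hy2
      rw [hcnt1 y] at hp1
      rw [hcnt2 y] at hp2
      by_cases hxy : x = y
      · subst hxy; simp at hp1 hp2; omega
      · simp [hxy] at hp1 hp2
        have hmem := h1 y hp1 hp2
        rcases List.mem_cons.mp hmem with h | h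
        · exact absurd h.symm hxy
        · exact h
    have hH2 : ∀ y, y ∈ a → st.2.count y ≤ b0.count y := by
      intro y hy
      have := h2 y (List.mem_cons_of_mem _ hy)
      rw [hcnt2 y]
      split <;> omega
    obtain ⟨hf1, hf2⟩ := ih st.1 st.2 hH1 hH2
    constructor
    · rw [hf1]
      ext y
      simp only [Multiset.count_sub, Multiset.count_inter, Multiset.coe_count,
        hcnt1, hcnt2]
      by_cases hxy : x = y
      · subst hxy; simp; omega
      · simp [hxy]
    · rw [hf2]
      ext y
      simp only [Multiset.count_sub, Multiset.count_inter, Multiset.coe_count,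
        hcnt1, hcnt2]
      by_cases hxy : x = y
      · subst hxy; simp; omega
      · simp [hxy]

theorem pvPairsA_eq_nil (ca cb : List String) (h : ∀ x, x ∈ ca → x ∉ cb) :
    pvPairsA ca cb = [] := by
  rw [pvPairsA, List.filter_eq_nil_iff]
  intro p hp
  simp only [List.mem_flatMap, List.mem_map] at hp
  obtain ⟨x, hx, y, hy, rfl⟩ := hp
  simp only [beq_iff_eq]
  intro hxy
  exact h x hx (hxy ▸ hy)

theorem pvPairsA_mem (ca cb : List String) (x : String) (hx : x ∈ ca) (hy : x ∈ cb) :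
    (x, x) ∈ pvPairsA ca cb := by
  simp only [pvPairsA, List.mem_filter, List.mem_flatMap, List.mem_map]
  exact ⟨⟨x, hx, x, hy, rfl⟩, by simp⟩

-- ===== VERDICT (by name: the statement is the Claim_ definition above) =====
theorem calculate_diversity_result_py_spec : Claim_equal_calculate_diversity_result_py := by
  intro a b _
  unfold Spec_calculate_diversity_result_py calculate_diversity_result_py
      calculate_diversity_result_py_alt
  rw [pvGreedyB_eq_card_inter]
  by_cases hps : pvPairsA a b = []
  · have hint : (↑a : Multiset String) ∩ (↑b : Multiset String) = 0 := by
      ext y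
      rw [Multiset.count_inter]
      by_cases hy1 : y ∈ a
      · by_cases hy2 : y ∈ b
        · exact absurd (pvPairsA_mem a b y hy1 hy2) (by simp [hps])
        · simp [Multiset.coe_count, List.count_eq_zero.mpr hy2]
      · simp [Multiset.coe_count, List.count_eq_zero.mpr hy1]
    rw [pvLoopA]
    simp only [hps, List.isEmpty_nil, if_true, hint]
    simp
  · obtain ⟨p, hp⟩ := List.exists_mem_of_ne_nil _ hps
    have hpab : p.1 ∈ a ∧ p.2 ∈ b := by
      have hp' := hp
      rw [pvPairsA, List.mem_filter] at hp'
      obtain ⟨hmem, _⟩ := hp'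
      simp only [List.mem_flatMap, List.mem_map] at hmem
      obtain ⟨x, hx, y, hy, hxy⟩ := hmem
      subst hxy
      exact ⟨hx, hy⟩
    have hla : 1 ≤ a.length := List.length_pos_iff.mpr (List.ne_nil_of_mem hpab.1)
    have hlb : 1 ≤ b.length := List.length_pos_iff.mpr (List.ne_nil_of_mem hpab.2)
    obtain ⟨hs1, hs2⟩ := pvPass_inter b a a b (fun _ hx _ => hx) (fun _ _ => le_refl _)
    set st := (pvPairsA a b).foldl pvStepA (a, b) with hstdef
    -- the two halves of st are disjoint, so the second while-test is empty
    have hdisj : ∀ x, x ∈ st.1 → x ∉ st.2 := by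
      intro x hx1 hx2
      have h1 : 0 < st.1.count x := List.count_pos_iff.mpr hx1
      have h2 : 0 < st.2.count x := List.count_pos_iff.mpr hx2
      have e1 := congrArg (Multiset.count x) hs1
      have e2 := congrArg (Multiset.count x) hs2
      simp only [Multiset.coe_count, Multiset.count_sub, Multiset.count_inter] at e1 e2
      omega
    have hps2 : pvPairsA st.1 st.2 = [] := pvPairsA_eq_nil st.1 st.2 hdisj
    rw [pvLoopA]
    rw [if_neg (fun hc => hps (List.isEmpty_iff.mp hc))]
    have hfuel : a.length + b.length = (a.length + b.length - 1) + 1 := by omega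
    rw [← hstdef, hfuel, pvLoopA]
    simp only [hps2, List.isEmpty_nil, if_true]
    -- compare the two integer arguments
    have hg : Multiset.card ((↑a : Multiset String) ∩ (↑b : Multiset String)) ≤ a.length := by
      have := Multiset.card_le_card (Multiset.inter_le_left
        (s := (↑a : Multiset String)) (t := (↑b : Multiset String)))
      simpa using this
    have hg' : Multiset.card ((↑a : Multiset String) ∩ (↑b : Multiset String)) ≤ b.length := by
      have := Multiset.card_le_card (Multiset.inter_le_right
        (s := (↑a : Multiset String)) (t := (↑b : Multiset String)))
      simpa using this
    have hlen1 : st.1.length = a.length - Multiset.card ((↑a : Multiset String) ∩ ↑b) := by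
      have h := congrArg Multiset.card hs1
      rw [Multiset.coe_card, Multiset.card_sub Multiset.inter_le_left, Multiset.coe_card] at h
      exact h
    have hlen2 : st.2.length = b.length - Multiset.card ((↑a : Multiset String) ∩ ↑b) := by
      have h := congrArg Multiset.card hs2
      rw [Multiset.coe_card, Multiset.card_sub Multiset.inter_le_right, Multiset.coe_card] at h
      exact h
    rw [hlen1, hlen2]
    congr 1
    push_cast [Nat.cast_sub hg, Nat.cast_sub hg']
    ring
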